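-- pv_equiv track=rewrite | github.com/chapmanjacobd/library | xklb/utils.py | list_dict_filter_unique
-- ===== SOURCE A (Python) =====
-- from typing import Any, Dict, Iterator, List, NoReturn, Optional, Union
--
-- def list_dict_filter_unique(data: List[dict]) -> List[dict]:
--     if len(data) == 0:
--         return []
--
--     unique_values = {}
--     for key in set.intersection(*(set(d.keys()) for d in data)):
--         values = {d[key] for d in data if key in d}
--         if len(values) > 1:
--             unique_values[key] = values
--     filtered_data = [{k: v for k, v in d.items() if k in unique_values} for d in data]
--     return filtered_data
-- ===== SOURCE B (Python) =====
-- def list_dict_filter_unique(data):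
--     if len(data) == 0:
--         return []
--     n = len(data)
--     # one pass: key -> [count_of_dicts_containing_key, first_value, varies?]
--     table = {}
--     for d in data:
--         for k, v in d.items():
--             e = table.get(k)
--             if e is None:
--                 table[k] = [1, v, False]
--             else:
--                 e[0] += 1
--                 if v != e[1]:
--                     e[2] = True
--     keep = {k for k, (cnt, _first, varies) in table.items() if cnt == n and varies}
--     return [{k: v for k, v in d.items() if k in keep} for d in data]
-- ===== Notes on version B (the rewrite author's own statement) =====
-- stated objective: alternative
-- what changed: Replaces A's n-way key-set intersection followed by a per-key rescan of all dicts (building a value set per candidate key) with a single streaming pass over all items that maintains key -> (count, first value, varies?) and keeps keys with count == len(data) and varies; no key-set intersection and no value sets are built.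
import Mathlib
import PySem

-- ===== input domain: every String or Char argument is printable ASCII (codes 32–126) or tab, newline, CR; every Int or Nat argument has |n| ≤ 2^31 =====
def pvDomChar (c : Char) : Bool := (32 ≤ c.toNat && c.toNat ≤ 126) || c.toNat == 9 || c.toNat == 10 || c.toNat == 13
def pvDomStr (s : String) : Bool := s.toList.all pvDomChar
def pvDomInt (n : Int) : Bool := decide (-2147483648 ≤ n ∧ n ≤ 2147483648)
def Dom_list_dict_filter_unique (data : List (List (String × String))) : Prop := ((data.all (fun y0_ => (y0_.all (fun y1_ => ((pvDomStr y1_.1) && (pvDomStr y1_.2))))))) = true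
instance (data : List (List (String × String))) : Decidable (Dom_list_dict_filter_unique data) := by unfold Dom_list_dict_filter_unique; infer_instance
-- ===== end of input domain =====

-- B replaces A's n-way key-set intersection plus a per-key rescan of all dicts by one pass over
-- all items maintaining key -> (count, first value, varies?); same return value, proved below.

-- ===== PORT A =====
-- A's dict parameters arrive as association lists; each is normalised to a PySem.Dict
-- (exactly Python's dict construction) before A's algorithm runs on it.
def list_dict_filter_unique (data : List (List (String × String))) : List (List (String × String)) :=
  if data.length = 0 then [] else
    let dicts := data.map (fun d => PySem.Dict.ofList d)
    let interKeys : PySem.Set String :=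
      match dicts.map (fun d => PySem.Set.ofList (PySem.Dict.keys d)) with
      | [] => PySem.Set.empty
      | s :: rest => rest.foldl (fun acc t => PySem.Set.inter acc t) s
    let uv : PySem.Dict String (PySem.Set String) :=
      interKeys.foldl (fun uv key =>
        let values : PySem.Set String :=
          dicts.foldl (fun s d =>
            if PySem.Dict.contains d key then PySem.Set.add s (PySem.Dict.getD d key "") else s)
            PySem.Set.empty
        if 1 < PySem.Set.len values then PySem.Dict.insert uv key values else uv)
        PySem.Dict.empty
    dicts.map (fun d => (PySem.Dict.items d).filter (fun kv => PySem.Dict.contains uv kv.1))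

-- ===== PORT B =====
-- one step of B's table update for one (key, value) item
def pvStepB (t : PySem.Dict String (Int × String × Bool)) (kv : String × String) :
    PySem.Dict String (Int × String × Bool) :=
  match PySem.Dict.get? t kv.1 with
  | none => PySem.Dict.insert t kv.1 (1, kv.2, false)
  | some e => PySem.Dict.insert t kv.1 (e.1 + 1, e.2.1, e.2.2 || kv.2 ≠ e.2.1)

def list_dict_filter_unique_alt (data : List (List (String × String))) : List (List (String × String)) :=
  if data.length = 0 then [] else
    let n : Int := data.length
    let dicts := data.map (fun d => PySem.Dict.ofList d)
    let table : PySem.Dict String (Int × String × Bool) :=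
      dicts.foldl (fun t d => (PySem.Dict.items d).foldl pvStepB t) PySem.Dict.empty
    let keep : PySem.Set String :=
      (PySem.Dict.items table).foldl
        (fun s kv => if kv.2.1 = n ∧ kv.2.2.2 = true then PySem.Set.add s kv.1 else s)
        PySem.Set.empty
    dicts.map (fun d => (PySem.Dict.items d).filter (fun kv => PySem.Set.contains keep kv.1))

-- ===== PRECONDITION & SPEC =====
def Spec_list_dict_filter_unique (data : List (List (String × String))) (out : List (List (String × String))) : Prop := out = list_dict_filter_unique_alt data
instance (data : List (List (String × String))) (out : List (List (String × String))) : Decidable (Spec_list_dict_filter_unique data out) := by unfold Spec_list_dict_filter_unique; infer_instance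

-- ===== CLAIM (what is proved, stated in full; the proofs are below) =====
def Claim_equal_list_dict_filter_unique : Prop := ∀ (data : List (List (String × String))), Dom_list_dict_filter_unique data → Spec_list_dict_filter_unique data (list_dict_filter_unique data)


-- ===== LEMMAS AND PROOFS =====

-- values of key k across the dicts, in dict order (one value per dict that contains k)
def pvVlist (dicts : List (PySem.Dict String String)) (k : String) : List String :=
  dicts.flatMap (fun d => (PySem.Dict.get? d k).toList)

-- B's table update, seen per key
def pvStep1 (e : Option (Int × String × Bool)) (v : String) : Option (Int × String × Bool) :=
  match e with
  | none => some (1, v, false)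
  | some e => some (e.1 + 1, e.2.1, e.2.2 || decide (v ≠ e.2.1))

theorem pvA_values (k : String) : ∀ (dicts : List (PySem.Dict String String)) (s0 : PySem.Set String),
    dicts.foldl (fun s d => if PySem.Dict.contains d k then PySem.Set.add s (PySem.Dict.getD d k "") else s) s0
      = PySem.Set.update s0 (pvVlist dicts k) := by
  intro dicts
  induction dicts with
  | nil => intro s0; simp [pvVlist, PySem.Set.update]
  | cons d ds ih =>
    intro s0
    simp only [List.foldl_cons, pvVlist, List.flatMap_cons]
    rw [PySem.Dict.contains_eq_isSome_get?, PySem.Dict.getD_eq_get?_getD]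
    cases h : PySem.Dict.get? d k with
    | none => simpa [h, pvVlist] using ih s0
    | some v =>
      simp only [Option.isSome_some, if_pos, Option.toList_some, Option.getD_some]
      rw [ih (PySem.Set.add s0 v)]
      simp [pvVlist, PySem.Set.update_cons]

theorem pvInter_mem (k : String) : ∀ (l : List (PySem.Set String)) (s0 : PySem.Set String),
    k ∈ l.foldl (fun acc t => PySem.Set.inter acc t) s0 ↔ k ∈ s0 ∧ ∀ t ∈ l, k ∈ t := by
  intro l
  induction l with
  | nil => intro s0; simp
  | cons t ts ih =>
    intro s0
    rw [List.foldl_cons, ih]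
    simp [PySem.Set.mem_inter]
    tauto

theorem pvLen_iff (s : PySem.Set String) : 1 < PySem.Set.len s ↔ 1 < s.length := by
  show (1 : Int) < (List.length s : Int) ↔ _
  exact_mod_cast Iff.rfl

theorem pvUv_contains (dicts : List (PySem.Dict String String)) :
    ∀ (l : List String) (uv0 : PySem.Dict String (PySem.Set String)) (k : String),
    ((l.foldl (fun uv key =>
        let values : PySem.Set String :=
          dicts.foldl (fun s d =>
            if PySem.Dict.contains d key then PySem.Set.add s (PySem.Dict.getD d key "") else s)
            PySem.Set.empty
        if 1 < PySem.Set.len values then PySem.Dict.insert uv key values else uv) uv0).contains k = true)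
      ↔ (uv0.contains k = true ∨ (k ∈ l ∧ 1 < (PySem.Set.ofList (pvVlist dicts k)).length)) := by
  intro l
  induction l with
  | nil => intro uv0 k; simp
  | cons key rest ih =>
    intro uv0 k
    rw [List.foldl_cons]
    simp only []
    have hupd : PySem.Set.update PySem.Set.empty (pvVlist dicts key) = PySem.Set.ofList (pvVlist dicts key) :=
      PySem.Set.update_nil_left _
    rw [pvA_values key dicts PySem.Set.empty, hupd]
    by_cases hc : 1 < PySem.Set.len (PySem.Set.ofList (pvVlist dicts key))
    · rw [if_pos hc, ih]
      have hc' := (pvLen_iff _).1 hc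
      by_cases hk : k = key
      · subst hk
        simp [hc']
      · have hb : (k == key) = false := by simp [hk]
        simp [PySem.Dict.contains_insert, hb, List.mem_cons, hk]
    · rw [if_neg hc, ih]
      have hc' : ¬ 1 < (PySem.Set.ofList (pvVlist dicts key)).length := fun h => hc ((pvLen_iff _).2 h)
      by_cases hk : k = key
      · subst hk; simp [hc']
      · simp [List.mem_cons, hk]

theorem pvStepB_get? (t : PySem.Dict String (Int × String × Bool)) (kv : String × String) (k : String) :
    (pvStepB t kv).get? k = if kv.1 = k then pvStep1 (PySem.Dict.get? t k) kv.2 else PySem.Dict.get? t k := by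
  by_cases hk : kv.1 = k
  · subst hk
    cases h : PySem.Dict.get? t kv.1 with
    | none => simp [pvStepB, pvStep1, h]
    | some e => simp [pvStepB, pvStep1, h]
  · have hk' : k ≠ kv.1 := fun hh => hk hh.symm
    cases h : PySem.Dict.get? t kv.1 with
    | none => simp [pvStepB, h, PySem.Dict.get?_insert, hk, hk']
    | some e => simp [pvStepB, h, PySem.Dict.get?_insert, hk, hk']

theorem pvTable_get? : ∀ (l : List (String × String)) (t : PySem.Dict String (Int × String × Bool)) (k : String),
    (l.foldl pvStepB t).get? k
      = ((l.filter (fun p => decide (p.1 = k))).map Prod.snd).foldl pvStep1 (PySem.Dict.get? t k) := by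
  intro l
  induction l with
  | nil => intro t k; simp
  | cons kv rest ih =>
    intro t k
    rw [List.foldl_cons, ih, List.filter_cons]
    by_cases hk : kv.1 = k
    · simp only [hk, decide_true, if_pos, List.map_cons, List.foldl_cons]
      rw [pvStepB_get?, if_pos hk]
    · simp only [hk, decide_false, if_neg, Bool.false_eq_true, not_false_iff]
      rw [pvStepB_get?, if_neg hk]

theorem pvTable_nodup : ∀ (l : List (String × String)) (t : PySem.Dict String (Int × String × Bool)),
    t.keys.Nodup → (l.foldl pvStepB t).keys.Nodup := by
  intro l
  induction l with
  | nil => intro t h; simpa using h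
  | cons kv rest ih =>
    intro t h
    rw [List.foldl_cons]
    apply ih
    unfold pvStepB
    cases PySem.Dict.get? t kv.1 <;> exact PySem.Dict.nodup_keys_insert _ _ _ h

theorem pvStep1_foldl : ∀ (vs : List String) (e : Int × String × Bool),
    vs.foldl pvStep1 (some e)
      = some (e.1 + vs.length, e.2.1, e.2.2 || vs.any (fun v => decide (v ≠ e.2.1))) := by
  intro vs
  induction vs with
  | nil => intro e; simp
  | cons v vs ih =>
    intro e
    rw [List.foldl_cons]
    show vs.foldl pvStep1 (some (e.1 + 1, e.2.1, e.2.2 || decide (v ≠ e.2.1))) = _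
    rw [ih]
    simp only [List.length_cons, List.any_cons, Option.some.injEq, Prod.mk.injEq]
    exact ⟨by push_cast; ring, by simp [Bool.or_assoc]⟩

theorem pvStep1_none : ∀ (vs : List String),
    vs.foldl pvStep1 none
      = match vs with
        | [] => none
        | v :: vs => some (1 + vs.length, v, vs.any (fun w => decide (w ≠ v))) := by
  intro vs
  cases vs with
  | nil => simp
  | cons v vs =>
    rw [List.foldl_cons]
    show vs.foldl pvStep1 (some (1, v, false)) = _
    rw [pvStep1_foldl]
    simp

theorem pvDictFilter (k : String) : ∀ (l : List (String × String)), (l.map Prod.fst).Nodup →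
    ((l.filter (fun p => decide (p.1 = k))).map Prod.snd) = ((PySem.Dict.mk l).get? k).toList := by
  intro l
  induction l with
  | nil => intro _; simp [PySem.Dict.get?]
  | cons p rest ih =>
    intro hnd
    rw [List.map_cons, List.nodup_cons] at hnd
    obtain ⟨hp, hrest⟩ := hnd
    rw [List.filter_cons, PySem.Dict.get?_mk_cons]
    by_cases hk : p.1 = k
    · have hb : (p.1 == k) = true := by simp [hk]
      simp only [hk, decide_true, if_pos, List.map_cons]
      have hempty : rest.filter (fun q => decide (q.1 = k)) = [] := by
        rw [List.filter_eq_nil_iff]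
        intro q hq hqk
        simp only [decide_eq_true_eq] at hqk
        have hmem : q.1 ∈ rest.map Prod.fst := List.mem_map_of_mem hq
        rw [hqk, ← hk] at hmem
        exact hp hmem
      rw [hempty]
      simp
    · have hb : (p.1 == k) = false := by simp [hk]
      simp only [hk, decide_false, Bool.false_eq_true, not_false_iff, if_neg, hb]
      exact ih hrest

theorem pvVlist_length (k : String) : ∀ (dicts : List (PySem.Dict String String)),
    (pvVlist dicts k).length = dicts.countP (fun d => (PySem.Dict.get? d k).isSome) := by
  intro dicts
  induction dicts with
  | nil => simp [pvVlist]
  | cons d ds ih =>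
    simp only [pvVlist, List.flatMap_cons, List.length_append, List.countP_cons]
    rw [show (ds.flatMap fun d => (PySem.Dict.get? d k).toList) = pvVlist ds k from rfl, ih]
    cases h : PySem.Dict.get? d k <;> simp [h] <;> omega

theorem pvSetCard (l : List String) :
    1 < (PySem.Set.ofList l).length ↔ ∃ a ∈ l, ∃ b ∈ l, a ≠ b := by
  have hnd := PySem.Set.nodup_ofList l
  have hmem := fun y => PySem.Set.mem_ofList l y
  constructor
  · intro h
    rcases hs : PySem.Set.ofList l with _ | ⟨a, _ | ⟨b, t⟩⟩ <;> rw [hs] at h hnd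
    · simp at h
    · simp at h
    · rw [List.nodup_cons] at hnd
      have hab : a ≠ b := fun he => hnd.1 (he ▸ List.mem_cons_self ..)
      refine ⟨a, ?_, b, ?_, hab⟩
      · rw [← hmem a, hs]; exact List.mem_cons_self ..
      · rw [← hmem b, hs]; simp
  · rintro ⟨a, ha, b, hb, hab⟩
    have ha' : a ∈ PySem.Set.ofList l := (hmem a).2 ha
    have hb' : b ∈ PySem.Set.ofList l := (hmem b).2 hb
    rcases hs : PySem.Set.ofList l with _ | ⟨x, _ | ⟨y, t⟩⟩ <;> rw [hs] at ha' hb'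
    · simp at ha'
    · simp at ha' hb'; exact absurd (ha'.trans hb'.symm) hab
    · simp

theorem pvExistsPair (v : String) (vs : List String) :
    (∃ a ∈ v :: vs, ∃ b ∈ v :: vs, a ≠ b) ↔ vs.any (fun w => decide (w ≠ v)) = true := by
  rw [List.any_eq_true]
  constructor
  · rintro ⟨a, ha, b, hb, hab⟩
    by_contra h
    push_neg at h
    have hall : ∀ w ∈ v :: vs, w = v := by
      intro w hw
      rcases List.mem_cons.1 hw with h1 | h2
      · exact h1
      · have := h w h2
        simpa using this
    exact hab ((hall a ha).trans (hall b hb).symm)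
  · rintro ⟨w, hw, hwv⟩
    simp only [decide_eq_true_eq] at hwv
    exact ⟨v, List.mem_cons_self .., w, List.mem_cons_of_mem _ hw, fun h => hwv h.symm⟩

theorem pvKeep_mem (n : Int) : ∀ (l : List (String × (Int × String × Bool))) (s0 : PySem.Set String) (k : String),
    (PySem.Set.contains (l.foldl (fun s kv => if kv.2.1 = n ∧ kv.2.2.2 = true then PySem.Set.add s kv.1 else s) s0) k = true)
      ↔ (PySem.Set.contains s0 k = true ∨ ∃ kv ∈ l, kv.1 = k ∧ kv.2.1 = n ∧ kv.2.2.2 = true) := by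
  intro l
  induction l with
  | nil => intro s0 k; simp
  | cons kv rest ih =>
    intro s0 k
    rw [List.foldl_cons]
    by_cases hc : kv.2.1 = n ∧ kv.2.2.2 = true
    · rw [if_pos hc, ih]
      simp only [PySem.Set.contains_iff, PySem.Set.mem_add, List.mem_cons]
      constructor
      · rintro (⟨h | h⟩ | h)
        · exact Or.inl h
        · exact Or.inr ⟨kv, Or.inl rfl, h.symm, hc⟩
        · obtain ⟨p, hp, h1, h2⟩ := h; exact Or.inr ⟨p, Or.inr hp, h1, h2⟩
      · rintro (h | ⟨p, hp | hp, h1, h2⟩)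
        · exact Or.inl (Or.inl h)
        · exact Or.inl (Or.inr (hp ▸ h1.symm))
        · exact Or.inr ⟨p, hp, h1, h2⟩
    · rw [if_neg hc, ih]
      constructor
      · rintro (h | ⟨p, hp, h1, h2⟩)
        · exact Or.inl h
        · exact Or.inr ⟨p, List.mem_cons_of_mem _ hp, h1, h2⟩
      · rintro (h | ⟨p, hp, h1, h2⟩)
        · exact Or.inl h
        · rcases List.mem_cons.1 hp with rfl | hp'
          · exact absurd ⟨h2.1, h2.2⟩ hc
          · exact Or.inr ⟨p, hp', h1, h2⟩


theorem pvTableOuter_nodup : ∀ (dicts : List (PySem.Dict String String)) (t : PySem.Dict String (Int × String × Bool)),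
    t.keys.Nodup → (dicts.foldl (fun t d => (PySem.Dict.items d).foldl pvStepB t) t).keys.Nodup := by
  intro dicts
  induction dicts with
  | nil => intro t h; simpa using h
  | cons d ds ih =>
    intro t h
    rw [List.foldl_cons]
    exact ih _ (pvTable_nodup _ _ h)

theorem pvTableOuter_get? : ∀ (dicts : List (PySem.Dict String String)),
    (∀ d ∈ dicts, d.keys.Nodup) → ∀ (t : PySem.Dict String (Int × String × Bool)) (k : String),
    (dicts.foldl (fun t d => (PySem.Dict.items d).foldl pvStepB t) t).get? k
      = (pvVlist dicts k).foldl pvStep1 (PySem.Dict.get? t k) := by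
  intro dicts
  induction dicts with
  | nil => intro _ t k; simp [pvVlist]
  | cons d ds ih =>
    intro h t k
    rw [List.foldl_cons, ih (fun d hd => h d (List.mem_cons_of_mem _ hd)), pvTable_get?]
    have hfilt : ((d.items.filter (fun p => decide (p.1 = k))).map Prod.snd)
        = (PySem.Dict.get? d k).toList :=
      pvDictFilter k d.items (by simpa [PySem.Dict.keys] using h d (List.mem_cons_self ..))
    rw [hfilt]
    show _ = ((PySem.Dict.get? d k).toList ++ pvVlist ds k).foldl pvStep1 _
    rw [List.foldl_append]

-- ===== VERDICT (by name: the statement is the Claim_ definition above) =====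
theorem pvPred (D : PySem.Dict String String) (Ds : List (PySem.Dict String String))
    (hnd : ∀ d ∈ D :: Ds, (PySem.Dict.keys d).Nodup) (n : Int)
    (hn : n = (((D :: Ds).length : Nat) : Int)) (k : String) :
    PySem.Dict.contains
      (List.foldl
        (fun uv key =>
          if 1 < PySem.Set.len (List.foldl
              (fun s d => if PySem.Dict.contains d key then PySem.Set.add s (PySem.Dict.getD d key "") else s)
              PySem.Set.empty (D :: Ds)) then
            PySem.Dict.insert uv key (List.foldl
              (fun s d => if PySem.Dict.contains d key then PySem.Set.add s (PySem.Dict.getD d key "") else s)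
              PySem.Set.empty (D :: Ds))
          else uv)
        PySem.Dict.empty
        (List.foldl (fun acc t => PySem.Set.inter acc t) (PySem.Set.ofList (PySem.Dict.keys D))
          (List.map (fun d => PySem.Set.ofList (PySem.Dict.keys d)) Ds))) k
    = PySem.Set.contains
        (List.foldl (fun s kv => if kv.2.1 = n ∧ kv.2.2.2 = true then PySem.Set.add s kv.1 else s)
          PySem.Set.empty
          (PySem.Dict.items
            (List.foldl (fun t d => List.foldl pvStepB t (PySem.Dict.items d)) PySem.Dict.empty (D :: Ds)))) k := by
  have hks : ∀ d : PySem.Dict String String,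
      k ∈ PySem.Set.ofList (PySem.Dict.keys d) ↔ (PySem.Dict.get? d k).isSome = true := by
    intro d
    rw [PySem.Set.mem_ofList, ← PySem.Dict.contains_iff_mem_keys, PySem.Dict.contains_eq_isSome_get?]
  have h1 : k ∈ List.foldl (fun acc t => PySem.Set.inter acc t) (PySem.Set.ofList (PySem.Dict.keys D))
        (List.map (fun d => PySem.Set.ofList (PySem.Dict.keys d)) Ds)
      ↔ ∀ d ∈ D :: Ds, (PySem.Dict.get? d k).isSome = true := by
    rw [pvInter_mem]
    constructor
    · rintro ⟨h0, hrest⟩ d hd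
      rcases List.mem_cons.1 hd with rfl | hd'
      · exact (hks d).1 h0
      · exact (hks d).1 (hrest _ (List.mem_map_of_mem hd'))
    · intro hall
      refine ⟨(hks D).2 (hall D (List.mem_cons_self ..)), ?_⟩
      rintro t ht
      rcases List.mem_map.1 ht with ⟨d, hd, rfl⟩
      exact (hks d).2 (hall d (List.mem_cons_of_mem _ hd))
  have hnodT : (List.foldl (fun t d => List.foldl pvStepB t (PySem.Dict.items d)) PySem.Dict.empty (D :: Ds)).keys.Nodup :=
    pvTableOuter_nodup _ _ (by simp)
  have h2 : PySem.Dict.get? (List.foldl (fun t d => List.foldl pvStepB t (PySem.Dict.items d)) PySem.Dict.empty (D :: Ds)) k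
      = (pvVlist (D :: Ds) k).foldl pvStep1 none := by
    have h := pvTableOuter_get? (D :: Ds) hnd PySem.Dict.empty k
    simpa using h
  have h3 : (∃ kv ∈ (List.foldl (fun t d => List.foldl pvStepB t (PySem.Dict.items d)) PySem.Dict.empty (D :: Ds)).items,
        kv.1 = k ∧ kv.2.1 = n ∧ kv.2.2.2 = true)
      ↔ (∃ e : Int × String × Bool, (pvVlist (D :: Ds) k).foldl pvStep1 none = some e ∧ e.1 = n ∧ e.2.2 = true) := by
    constructor
    · rintro ⟨⟨k', e⟩, hmem, hk, hP⟩
      cases hk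
      exact ⟨e, by rw [← h2]; exact (PySem.Dict.get?_eq_some_iff_mem_items _ _ _ hnodT).2 hmem, hP⟩
    · rintro ⟨e, hget, hP⟩
      rw [← h2] at hget
      exact ⟨(k, e), (PySem.Dict.get?_eq_some_iff_mem_items _ _ _ hnodT).1 hget, rfl, hP⟩
  have hcnt : (pvVlist (D :: Ds) k).length = (D :: Ds).countP (fun d => (PySem.Dict.get? d k).isSome) :=
    pvVlist_length k (D :: Ds)
  have hall_iff : (∀ d ∈ D :: Ds, (PySem.Dict.get? d k).isSome = true)
      ↔ (pvVlist (D :: Ds) k).length = (D :: Ds).length := by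
    rw [hcnt]; exact List.countP_eq_length.symm
  have hmid : (PySem.Dict.contains (PySem.Dict.empty : PySem.Dict String (PySem.Set String)) k = true
        ∨ (k ∈ List.foldl (fun acc t => PySem.Set.inter acc t) (PySem.Set.ofList (PySem.Dict.keys D))
            (List.map (fun d => PySem.Set.ofList (PySem.Dict.keys d)) Ds)
          ∧ 1 < (PySem.Set.ofList (pvVlist (D :: Ds) k)).length))
      ↔ (PySem.Set.contains (PySem.Set.empty : PySem.Set String) k = true
        ∨ ∃ kv ∈ (List.foldl (fun t d => List.foldl pvStepB t (PySem.Dict.items d)) PySem.Dict.empty (D :: Ds)).items,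
            kv.1 = k ∧ kv.2.1 = n ∧ kv.2.2.2 = true) := by
    rw [h1, h3]
    simp only [PySem.Dict.contains_empty, Bool.false_eq_true, false_or]
    have hemp : PySem.Set.contains (PySem.Set.empty : PySem.Set String) k = false := by
      simp [PySem.Set.empty]
    rw [hemp]
    simp only [Bool.false_eq_true, false_or]
    rw [hall_iff]
    cases hL : pvVlist (D :: Ds) k with
    | nil =>
      simp
    | cons v vs =>
      rw [pvStep1_none]
      constructor
      · rintro ⟨hlen, hcard⟩
        refine ⟨(1 + vs.length, v, vs.any fun w => decide (w ≠ v)), rfl, ?_, ?_⟩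
        · rw [hn, ← hlen]
          simp only [List.length_cons]
          omega
        · exact ((pvSetCard (v :: vs)).trans (pvExistsPair v vs)).1 hcard
      · rintro ⟨e, he, h1', h2'⟩
        have he' : e = (1 + (vs.length : Int), v, vs.any fun w => decide (w ≠ v)) := by
          have hsome : some e = some (1 + (vs.length : Int), v, vs.any fun w => decide (w ≠ v)) := he.symm
          exact Option.some.inj hsome
        subst he'
        constructor
        · have h1'' : (1 : Int) + vs.length = ((D :: Ds).length : Int) := by rw [← hn]; exact h1'
          simp only [List.length_cons] at h1'' ⊢
          omega
        · exact ((pvSetCard (v :: vs)).trans (pvExistsPair v vs)).2 h2'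
  rw [Bool.eq_iff_iff]
  exact Iff.trans (Iff.trans (pvUv_contains (D :: Ds) _ PySem.Dict.empty k) hmid) (pvKeep_mem n _ PySem.Set.empty k).symm

theorem pvMain (data : List (List (String × String))) :
    list_dict_filter_unique data = list_dict_filter_unique_alt data := by
  cases data with
  | nil => rfl
  | cons d0 rest =>
    simp only [list_dict_filter_unique, list_dict_filter_unique_alt, List.length_cons,
      Nat.succ_ne_zero, if_false, List.map_cons]
    have hnd : ∀ d ∈ PySem.Dict.ofList d0 :: List.map (fun d => PySem.Dict.ofList d) rest,
        (PySem.Dict.keys d).Nodup := by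
      intro d hd
      rcases List.mem_cons.1 hd with rfl | hd'
      · exact PySem.Dict.nodup_keys_ofList _
      · rcases List.mem_map.1 hd' with ⟨l, _, rfl⟩
        exact PySem.Dict.nodup_keys_ofList _
    have hn : ((rest.length + 1 : Nat) : Int)
        = (((PySem.Dict.ofList d0 :: List.map (fun d => PySem.Dict.ofList d) rest).length : Nat) : Int) := by
      simp
    simp only [pvPred (PySem.Dict.ofList d0) (List.map (fun d => PySem.Dict.ofList d) rest) hnd
      (((rest.length + 1 : Nat) : Int)) hn]
    rfl

theorem list_dict_filter_unique_spec : Claim_equal_list_dict_filter_unique := by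
  intro data _
  unfold Spec_list_dict_filter_unique
  exact pvMain data
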